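-- pv_equiv track=rewrite | github.com/ebehlmann/puzzling | python/advent_of_code/2015/day_3/day_3.py | track_visits_with_robo
-- ===== SOURCE A (Python) =====
-- def follow_instruction(current_location, direction):
-- 	if direction == '>':
-- 		new_location = (current_location[0] + 1, current_location[1])
-- 	elif direction == '<':
-- 		new_location = (current_location[0] - 1, current_location[1])
-- 	elif direction == '^':
-- 		new_location = (current_location[0], current_location[1] + 1)
-- 	else:
-- 		new_location = (current_location[0], current_location[1] - 1)
-- 	return new_location
--
-- def add_visit(visits, location):
-- 	if location in visits:
-- 		visits[location] += 1
-- 	else: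
-- 		visits[location] = 1
-- 	return visits
--
-- def track_visits_with_robo(instructions):
-- 	visits = {}
-- 	santa_location = (0, 0)
-- 	robo_location = (0, 0)
-- 	visits[(0, 0)] = 2
-- 	i = 0
-- 	while i < len(instructions):
-- 		if i % 2 == 0:
-- 			santa_location = follow_instruction(santa_location, instructions[i])
-- 			visits = add_visit(visits, santa_location)
-- 		else:
-- 			robo_location = follow_instruction(robo_location, instructions[i])
-- 			visits = add_visit(visits, robo_location)
-- 		i += 1
-- 	return visits
-- ===== SOURCE B (Python) =====
-- def walk(moves):
-- 	# positions visited walking the given moves from the origin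
-- 	path = []
-- 	x = y = 0
-- 	for c in moves:
-- 		if c == '>':
-- 			x += 1
-- 		elif c == '<':
-- 			x -= 1
-- 		elif c == '^':
-- 			y += 1
-- 		else:
-- 			y -= 1
-- 		path.append((x, y))
-- 	return path
--
-- def interleave(xs, ys):
-- 	# round-robin merge; len(xs) is len(ys) or len(ys) + 1
-- 	out = []
-- 	for a, b in zip(xs, ys):
-- 		out.append(a)
-- 		out.append(b)
-- 	out.extend(xs[len(ys):])
-- 	return out
--
-- def track_visits_with_robo(instructions):
-- 	santa_path = walk(instructions[0::2])
-- 	robo_path = walk(instructions[1::2])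
-- 	visits = {(0, 0): 2}
-- 	for p in interleave(santa_path, robo_path):
-- 		visits[p] = visits.get(p, 0) + 1
-- 	return visits
-- ===== Notes on version B (the rewrite author's own statement) =====
-- stated objective: alternative
-- what changed: B replaces A's single interleaved walk (index loop with a parity test choosing which walker moves and updates the dict) by a partition decomposition: slice the instructions into Santa's moves [0::2] and the robot's moves [1::2], walk each slice independently to a position list, round-robin merge the two paths, and tally the merged path into the dict in one separate pass.
import Mathlib
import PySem

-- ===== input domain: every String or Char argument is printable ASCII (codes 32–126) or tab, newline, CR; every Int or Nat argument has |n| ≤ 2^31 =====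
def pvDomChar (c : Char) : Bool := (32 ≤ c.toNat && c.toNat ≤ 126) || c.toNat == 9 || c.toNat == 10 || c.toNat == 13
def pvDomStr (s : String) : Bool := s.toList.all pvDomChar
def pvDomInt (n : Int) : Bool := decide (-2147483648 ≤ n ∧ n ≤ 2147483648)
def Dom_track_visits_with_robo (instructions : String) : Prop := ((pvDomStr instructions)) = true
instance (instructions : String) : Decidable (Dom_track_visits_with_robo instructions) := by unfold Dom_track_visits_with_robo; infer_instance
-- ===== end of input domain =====

-- B partitions the instructions into Santa's slice [0::2] and the robot's slice [1::2], walks each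
-- slice independently, round-robin merges the two paths and tallies them in a separate pass,
-- instead of A's single interleaved parity-indexed walk; objective: alternative decomposition, same cost.


-- ===== PORT A =====
def followInstruction (cur : Int × Int) (d : Char) : Int × Int :=
  if d = '>' then (cur.1 + 1, cur.2)
  else if d = '<' then (cur.1 - 1, cur.2)
  else if d = '^' then (cur.1, cur.2 + 1)
  else (cur.1, cur.2 - 1)

def addVisit (visits : PySem.Dict (Int × Int) Int) (loc : Int × Int) : PySem.Dict (Int × Int) Int :=
  if visits.contains loc then visits.insert loc (visits.getD loc 0 + 1)
  else visits.insert loc 1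

def aLoop : List Char → Nat → (Int × Int) → (Int × Int) → PySem.Dict (Int × Int) Int → PySem.Dict (Int × Int) Int
  | [], _, _, _, visits => visits
  | c :: rest, i, santa, robo, visits =>
    if i % 2 == 0 then
      let santa' := followInstruction santa c
      aLoop rest (i + 1) santa' robo (addVisit visits santa')
    else
      let robo' := followInstruction robo c
      aLoop rest (i + 1) santa robo' (addVisit visits robo')

def track_visits_with_robo (instructions : String) : List (Int × Int × Int) :=
  (aLoop instructions.toList 0 (0, 0) (0, 0) (PySem.Dict.empty.insert (0, 0) 2)).items.map
    (fun p => (p.1.1, p.1.2, p.2))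

-- ===== PORT B =====
-- walk(moves): the loop body's tuple append, as a fold over (path, x, y)
def bWalkStep (st : List (Int × Int) × Int × Int) (c : Char) : List (Int × Int) × Int × Int :=
  let x := st.2.1
  let y := st.2.2
  let p : Int × Int :=
    if c = '>' then (x + 1, y)
    else if c = '<' then (x - 1, y)
    else if c = '^' then (x, y + 1)
    else (x, y - 1)
  (st.1 ++ [p], p.1, p.2)

def bWalk (moves : List Char) : List (Int × Int) :=
  (moves.foldl bWalkStep ([], 0, 0)).1

-- interleave(xs, ys): zip loop, then extend with xs[len(ys):]
def bInterleave (xs ys : List (Int × Int)) : List (Int × Int) :=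
  ((xs.zip ys).foldl (fun out ab => out ++ [ab.1, ab.2]) []) ++
    PySem.List.slice xs (some (ys.length : Int)) none

-- step-2 string slices [0::2] / [1::2] are PySem.List.slice? on the char list (step 2 never raises)
def track_visits_with_robo_alt (instructions : String) : List (Int × Int × Int) :=
  let cs := instructions.toList
  let santaPath := bWalk ((PySem.List.slice? cs none none 2).getD [])
  let roboPath := bWalk ((PySem.List.slice? cs (some 1) none 2).getD [])
  ((bInterleave santaPath roboPath).foldl
      (fun v p => v.insert p (v.getD p 0 + 1))
      (PySem.Dict.empty.insert ((0 : Int), (0 : Int)) 2)).items.map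
    (fun p => (p.1.1, p.1.2, p.2))

-- ===== PRECONDITION & SPEC =====
def Spec_track_visits_with_robo (instructions : String) (out : List (Int × Int × Int)) : Prop := out = track_visits_with_robo_alt instructions
instance (instructions : String) (out : List (Int × Int × Int)) : Decidable (Spec_track_visits_with_robo instructions out) := by unfold Spec_track_visits_with_robo; infer_instance

-- ===== CLAIM (what is proved, stated in full; the proofs are below) =====
def Claim_equal_track_visits_with_robo : Prop := ∀ (instructions : String), Dom_track_visits_with_robo instructions → Spec_track_visits_with_robo instructions (track_visits_with_robo instructions)

-- ===== LEMMAS AND PROOFS =====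

-- elements at even indices
def evensL {α : Type} : List α → List α
  | [] => []
  | [a] => [a]
  | a :: _ :: r => a :: evensL r

-- elements at odd indices
def oddsL {α : Type} (xs : List α) : List α := evensL xs.tail

-- the visit path from a starting point, in cons form
def pWalk : (Int × Int) → List Char → List (Int × Int)
  | _, [] => []
  | s, c :: rest =>
    let p := followInstruction s c
    p :: pWalk p rest

lemma evensL_cons {α : Type} (a : α) (rest : List α) :
    evensL (a :: rest) = a :: oddsL rest := by
  cases rest <;> rfl

lemma length_evensL {α : Type} : ∀ xs : List α, (evensL xs).length = (xs.length + 1) / 2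
  | [] => by simp [evensL]
  | [_] => by simp [evensL]
  | _ :: _ :: r => by
    simp only [evensL, List.length_cons, length_evensL r]
    omega

lemma length_pWalk (ms : List Char) : ∀ s, (pWalk s ms).length = ms.length := by
  induction ms with
  | nil => intro s; rfl
  | cons c rest ih => intro s; simp [pWalk, ih]

lemma bWalk_acc (ms : List Char) : ∀ (acc : List (Int × Int)) (x y : Int),
    (ms.foldl bWalkStep (acc, x, y)).1 = acc ++ pWalk (x, y) ms := by
  induction ms with
  | nil => intro acc x y; simp [pWalk]
  | cons c rest ih =>
    intro acc x y
    simp only [List.foldl_cons, pWalk]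
    rw [show bWalkStep (acc, x, y) c =
          (acc ++ [followInstruction (x, y) c],
           (followInstruction (x, y) c).1, (followInstruction (x, y) c).2) from by
      simp [bWalkStep, followInstruction]]
    rw [ih]
    simp

lemma bWalk_eq_pWalk (ms : List Char) : bWalk ms = pWalk (0, 0) ms := by
  unfold bWalk
  rw [bWalk_acc]
  simp

lemma bInterleave_nil_left (ws : List (Int × Int)) : bInterleave [] ws = [] := by
  simp [bInterleave]

lemma bInterleave_nil_right (us : List (Int × Int)) : bInterleave us [] = us := by
  simp [bInterleave]

lemma foldl_pair_append (l : List ((Int × Int) × (Int × Int))) :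
    ∀ acc : List (Int × Int),
      l.foldl (fun out ab => out ++ [ab.1, ab.2]) acc =
        acc ++ l.foldl (fun out ab => out ++ [ab.1, ab.2]) [] := by
  induction l with
  | nil => intro acc; simp
  | cons p t ih =>
    intro acc
    simp only [List.foldl_cons]
    rw [ih (acc ++ [p.1, p.2]), ih ([] ++ [p.1, p.2])]
    simp

lemma bInterleave_cons_cons (u w : Int × Int) (us ws : List (Int × Int)) :
    bInterleave (u :: us) (w :: ws) = u :: w :: bInterleave us ws := by
  simp only [bInterleave, List.zip_cons_cons, List.foldl_cons, List.nil_append,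
    List.length_cons, PySem.List.slice_from_natCast]
  rw [foldl_pair_append]
  simp

lemma inter_swap : ∀ (ys xs : List (Int × Int)) (a : Int × Int),
    xs.length ≤ ys.length → ys.length ≤ xs.length + 1 →
    bInterleave (a :: xs) ys = a :: bInterleave ys xs := by
  intro ys
  induction ys with
  | nil =>
    intro xs a h1 _
    have : xs = [] := List.eq_nil_of_length_eq_zero (Nat.le_zero.mp h1)
    subst this
    rw [bInterleave_nil_right, bInterleave_nil_left]
  | cons b ys' ih =>
    intro xs a h1 h2
    cases xs with
    | nil =>
      have : ys' = [] := by
        simp only [List.length_cons, List.length_nil] at h2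
        exact List.eq_nil_of_length_eq_zero (by omega)
      subst this
      rw [bInterleave_cons_cons, bInterleave_nil_left, bInterleave_nil_right]
    | cons a2 xs' =>
      simp only [List.length_cons] at h1 h2
      rw [bInterleave_cons_cons, ih xs' a2 (by omega) (by omega),
        bInterleave_cons_cons]

-- A's add_visit is the tally step
lemma addVisit_eq_step (v : PySem.Dict (Int × Int) Int) (p : Int × Int) :
    addVisit v p = v.insert p (v.getD p 0 + 1) := by
  unfold addVisit
  by_cases h : v.contains p = true
  · simp [h]
  · simp only [Bool.not_eq_true] at h
    rw [if_neg (by simp [h]), PySem.Dict.getD_of_not_contains _ _ h, zero_add]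

-- A's loop does not depend on the parity start except by swapping the two walkers
lemma aLoop_swap (cs : List Char) : ∀ (i : Nat) (s r : Int × Int) (v : PySem.Dict (Int × Int) Int),
    aLoop cs i s r v = aLoop cs (i + 1) r s v := by
  induction cs with
  | nil => intro i s r v; rfl
  | cons c rest ih =>
    intro i s r v
    by_cases h : i % 2 = 0
    · have h' : (i + 1) % 2 = 1 := by omega
      simp only [aLoop, h, h']
      simp only [Nat.reduceBEq, beq_self_eq_true, if_true, if_false, reduceCtorEq]
      exact ih (i + 1) (followInstruction s c) r _
    · have h0 : i % 2 = 1 := by omega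
      have h' : (i + 1) % 2 = 0 := by omega
      simp only [aLoop, h0, h']
      simp only [Nat.reduceBEq, beq_self_eq_true, if_true, if_false, reduceCtorEq]
      exact ih (i + 1) s (followInstruction r c) _

-- the heart: A's interleaved walk tallies B's merged pair of independent walks
lemma aLoop_eq_merge : ∀ (cs : List Char) (s r : Int × Int) (v : PySem.Dict (Int × Int) Int),
    aLoop cs 0 s r v =
      (bInterleave (pWalk s (evensL cs)) (pWalk r (oddsL cs))).foldl
        (fun v p => v.insert p (v.getD p 0 + 1)) v := by
  intro cs
  induction cs with
  | nil => intro s r v; simp [aLoop, evensL, oddsL, pWalk, bInterleave_nil_left]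
  | cons c rest ih =>
    intro s r v
    have hlen : (oddsL rest).length ≤ (evensL rest).length ∧
        (evensL rest).length ≤ (oddsL rest).length + 1 := by
      unfold oddsL
      cases rest with
      | nil => simp [evensL]
      | cons d tl =>
        simp only [List.tail_cons, length_evensL, List.length_cons]
        omega
    simp only [aLoop, Nat.zero_mod, beq_self_eq_true, if_true]
    rw [show aLoop rest 1 (followInstruction s c) r (addVisit v (followInstruction s c)) =
          aLoop rest 0 r (followInstruction s c) (addVisit v (followInstruction s c)) from
      (aLoop_swap rest 0 r (followInstruction s c) _).symm]
    rw [ih]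
    have hO : oddsL (c :: rest) = evensL rest := rfl
    rw [evensL_cons, hO]
    simp only [pWalk]
    rw [inter_swap _ _ _ (by simp only [length_pWalk]; exact hlen.1)
        (by simp only [length_pWalk]; exact hlen.2)]
    rw [List.foldl_cons, addVisit_eq_step]

-- xs[0::2] on a list is the even-index elements
lemma fm_evens {α : Type} : ∀ (cs : List α),
    List.filterMap (fun k => cs[2 * k]?) (List.range ((cs.length + 1) / 2)) = evensL cs
  | [] => by simp [evensL]
  | [a] => by simp [evensL]
  | a :: b :: r => by
    have hc : (r.length + 2 + 1) / 2 = (r.length + 1) / 2 + 1 := by omega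
    simp only [List.length_cons, hc, List.range_succ_eq_map, List.filterMap_cons,
      List.filterMap_map]
    have h0 : (a :: b :: r)[2 * 0]? = some a := by simp
    rw [h0]
    have hrest : List.filterMap ((fun k => (a :: b :: r)[2 * k]?) ∘ Nat.succ)
        (List.range ((r.length + 1) / 2)) = evensL r := by
      rw [← fm_evens r]
      apply List.filterMap_congr
      intro k _
      simp only [Function.comp_apply]
      have : 2 * Nat.succ k = 2 * k + 1 + 1 := by omega
      rw [this]
      rfl
    rw [hrest]
    rfl

lemma slice2_evens (cs : List Char) :
    (PySem.List.slice? cs none none 2).getD [] = evensL cs := by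
  simp only [PySem.List.slice?, PySem.List.sliceIndices]
  norm_num
  by_cases hl : 0 < cs.length
  · rw [if_pos hl]
    have hcount : (((cs.length : Int) + 2 - 1) / 2).toNat = (cs.length + 1) / 2 := by omega
    rw [hcount, ← fm_evens cs]
    apply List.filterMap_congr
    intro k _
    have h2 : ((2 : Int) * (k : Int)).toNat = 2 * k := by omega
    rw [h2]
  · rw [if_neg hl]
    have : cs = [] := List.eq_nil_of_length_eq_zero (by omega)
    subst this
    simp [evensL]

lemma slice2_odds (cs : List Char) :
    (PySem.List.slice? cs (some 1) none 2).getD [] = oddsL cs := by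
  cases cs with
  | nil => rfl
  | cons a rest =>
    simp only [PySem.List.slice?, PySem.List.sliceIndices]
    norm_num
    by_cases hl : 0 < rest.length
    · rw [if_pos hl]
      have hcount : (((rest.length : Int) + 2 - 1) / 2).toNat = (rest.length + 1) / 2 := by omega
      rw [hcount]
      have : oddsL (a :: rest) = evensL rest := rfl
      rw [this, ← fm_evens rest]
      apply List.filterMap_congr
      intro k _
      have h2 : ((1 : Int) + 2 * (k : Int)).toNat = 2 * k + 1 := by omega
      rw [h2]
      rfl
    · rw [if_neg hl]
      have : rest = [] := List.eq_nil_of_length_eq_zero (by omega)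
      subst this
      rfl

-- ===== VERDICT (by name: the statement is the Claim_ definition above) =====
theorem track_visits_with_robo_spec : Claim_equal_track_visits_with_robo := by
  intro instructions _
  unfold Spec_track_visits_with_robo track_visits_with_robo track_visits_with_robo_alt
  simp only [slice2_evens, slice2_odds, bWalk_eq_pWalk, aLoop_eq_merge]
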